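-- pv_equiv track=rewrite | github.com/PrakritGoel/PythonProjects | cse30_word_search.py | traverse_diag_right_from_bottom
-- ===== SOURCE A (Python) =====
-- def create_slices(arr, slice_length):
--     """
--     Given an array arr and a slice length, construct a list of contiguous elements from
--     the array of size >= slice length, in both the forward and reversed orders. For
--     example, given an array [1, 2, 3, 4], and a slice length of 2, the function should
--     generate the lists ([1, 2], [1, 2, 3], [1, 2, 3, 4], [2, 3], [2, 3, 4], [3, 4],
--     [4, 3], [4, 3, 2], [4, 3, 2, 1], [3, 2], [3, 2, 1], [2, 1]).
--     The order of the lists is not important.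
--     param arr: Input array to be sliced
--     param slice_length: Minimum length of the slice to be used for array
--     return: List of sliced elements of the array
--     """
--     return_list = []
--     arr_reversed = list(reversed(arr))
--
--     for i in range(len(arr) - slice_length + 1):
--         for j in range(i + slice_length, len(arr) + 1):
--             return_list.append(''.join(arr[i:j]))
--             return_list.append(''.join(arr_reversed[i:j]))
--     return return_list
--
-- def traverse_diag_right_from_bottom(grid, size, min_len):
--     """
--     For each diagonal going right in the input grid, return contiguous words
--     of length >= min_len. The diagonal is scanned only from the bottom row,
--     and only for the diagonals not covered by the top row diagonal scan functions.
--     param grid: Input grid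
--     param size: Number of rows/columns in the grid
--     param min_len: Minimum length of the words to be returned
--     return: List of all words of length >= min_len
--     """
--     elem = []
--     return_list = []
--     for i in range(1, size - min_len + 1):
--         k = i
--         for j in range(size - 1, i - 1, -1):
--             # Create a list of elements in the right diagonal
--             # row starting from an element in row n - 1
--             elem.append(grid[j][k])
--             k += 1
--         for item in create_slices(elem, min_len):
--             return_list.append(item)
--         elem = []
--     return return_list
-- ===== SOURCE B (Python) =====
-- def _emit_runs(f, r, min_len, out):
--     """f and r are equal-length lists of cells. For each start a and each end
--     j >= a + min_len, append ''.join(f[a:j]) then ''.join(r[a:j]), growing the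
--     two run strings in lockstep instead of re-joining every slice."""
--     for a in range(len(f) - min_len + 1):
--         sf = ''.join(f[a:a + min_len])
--         sr = ''.join(r[a:a + min_len])
--         out.append(sf)
--         out.append(sr)
--         for x, y in zip(f[a + min_len:], r[a + min_len:]):
--             sf += x
--             sr += y
--             out.append(sf)
--             out.append(sr)
--
--
-- def traverse_diag_right_from_bottom(grid, size, min_len):
--     out = []
--     for i in range(1, size - min_len + 1):
--         rows = grid[i:size][::-1]
--         diag = [row[i + t] for t, row in enumerate(rows)]
--         _emit_runs(diag, diag[::-1], min_len, out)
--     return out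
-- ===== Notes on version B (the rewrite author's own statement) =====
-- stated objective: alternative
-- what changed: create_slices' nested re-join of every slice arr[i:j] of the diagonal and of a pre-reversed copy is replaced by one helper that walks the forward and reversed diagonal in lockstep via zip, growing both run strings incrementally; the diagonal itself is built by reversing a row slice of the grid and indexing it via enumerate instead of a hand-counted descending index loop.
-- outside the precondition, e.g. on traverse_diag_right_from_bottom([['a', 'b'], ['c', 'd']], 3, 1): A raises IndexError, B returns ['d', 'd']
import Mathlib
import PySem

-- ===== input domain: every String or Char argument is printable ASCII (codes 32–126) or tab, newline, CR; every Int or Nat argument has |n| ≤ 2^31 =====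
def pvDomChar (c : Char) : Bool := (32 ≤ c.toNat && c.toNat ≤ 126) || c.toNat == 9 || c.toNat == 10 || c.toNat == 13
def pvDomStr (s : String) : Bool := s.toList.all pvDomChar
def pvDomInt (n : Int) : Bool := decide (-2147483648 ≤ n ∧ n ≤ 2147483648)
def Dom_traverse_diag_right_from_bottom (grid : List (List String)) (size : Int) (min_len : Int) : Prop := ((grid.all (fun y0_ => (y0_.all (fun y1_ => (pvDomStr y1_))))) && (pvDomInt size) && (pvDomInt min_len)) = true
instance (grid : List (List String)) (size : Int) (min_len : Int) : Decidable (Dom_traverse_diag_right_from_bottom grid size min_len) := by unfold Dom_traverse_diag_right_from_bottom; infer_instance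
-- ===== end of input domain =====

-- B replaces create_slices (nested re-join of every slice of the diagonal and of a pre-reversed
-- copy) by one helper walking the forward and reversed diagonal in lockstep via zip, growing both
-- run strings incrementally; the diagonal itself comes from a reversed row slice (objective: alternative).

-- ===== PORT A =====
def create_slices (arr : List String) (slice_length : Int) : List String :=
  let arr_reversed := arr.reverse
  (PySem.List.pyRange 0 ((arr.length : Int) - slice_length + 1) 1).foldl
    (fun return_list i =>
      (PySem.List.pyRange (i + slice_length) ((arr.length : Int) + 1) 1).foldl
        (fun rl j =>
          (rl ++ [PySem.Str.join "" (PySem.List.slice arr (some i) (some j))])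
             ++ [PySem.Str.join "" (PySem.List.slice arr_reversed (some i) (some j))])
        return_list)
    []

-- 'for j in range(size - 1, i - 1, -1): elem.append(grid[j][k]); k += 1' — the range iterated
-- lazily (structural recursion), none = IndexError of grid[j][k], so the loop stops exactly where Python raises
def pv_diag_loop (grid : List (List String)) (j stop : Int) (elem : List String) (k : Int) :
    Option (List String) :=
  if _h : j ≤ stop then some elem
  else
    match PySem.List.pyGet? grid j with
    | none => none
    | some row =>
      match PySem.List.pyGet? row k with
      | none => none
      | some cell => pv_diag_loop grid (j - 1) stop (elem ++ [cell]) (k + 1)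
termination_by (j - stop).toNat
decreasing_by omega

-- 'for i in range(1, size - min_len + 1): …' of A, same lazy-range/exception convention
def pv_outerA (grid : List (List String)) (size min_len : Int) (i stop : Int)
    (return_list : List String) : Option (List String) :=
  if _h : stop ≤ i then some return_list
  else
    match pv_diag_loop grid (size - 1) (i - 1) [] i with
    | none => none
    | some elem =>
      pv_outerA grid size min_len (i + 1) stop
        ((create_slices elem min_len).foldl (fun r item => r ++ [item]) return_list)
termination_by (stop - i).toNat
decreasing_by omega

def traverse_diag_right_from_bottom (grid : List (List String)) (size : Int) (min_len : Int) : List String :=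
  (pv_outerA grid size min_len 1 (size - min_len + 1) []).getD []

-- ===== PORT B =====
-- _emit_runs of Source B: 'for a in range(len(f)-min_len+1): sf=join(f[a:a+ml]); sr=join(r[a:a+ml]);
-- out+= [sf,sr]; for x,y in zip(f[a+ml:], r[a+ml:]): sf+=x; sr+=y; out+=[sf,sr]'
def pv_emit (f r : List String) (min_len : Int) (out : List String) : List String :=
  (PySem.List.pyRange 0 ((f.length : Int) - min_len + 1) 1).foldl
    (fun o a =>
      let sf := PySem.Str.join "" (PySem.List.slice f (some a) (some (a + min_len)))
      let sr := PySem.Str.join "" (PySem.List.slice r (some a) (some (a + min_len)))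
      (((PySem.List.slice f (some (a + min_len)) none).zip
          (PySem.List.slice r (some (a + min_len)) none)).foldl
        (fun (q : List String × String × String) xy =>
          (q.1 ++ [q.2.1 ++ xy.1, q.2.2 ++ xy.2], q.2.1 ++ xy.1, q.2.2 ++ xy.2))
        (o ++ [sf, sr], sf, sr)).1)
    out

-- '[row[i + t] for t, row in enumerate(rows)]': left-to-right, none = IndexError at the first bad cell
def pv_diag_cells (i : Int) : List (Int × List String) → Option (List String)
  | [] => some []
  | (t, row) :: rest =>
    match PySem.List.pyGet? row (i + t) with
    | none => none
    | some cell => (pv_diag_cells i rest).map (fun d => cell :: d)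

-- 'rows = grid[i:size][::-1]' (reversal via [::-1] ported as .reverse, cf. slice?_none_none_neg_one)
def pv_diagB (grid : List (List String)) (size i : Int) : Option (List String) :=
  pv_diag_cells i (PySem.List.enumerate ((PySem.List.slice grid (some i) (some size)).reverse) 0)

-- 'for i in range(1, size - min_len + 1)' of B: recursion over the materialized range list
def pv_outerB (grid : List (List String)) (size min_len : Int) :
    List Int → List String → Option (List String)
  | [], out => some out
  | i :: rest, out =>
    match pv_diagB grid size i with
    | none => none
    | some diag => pv_outerB grid size min_len rest (pv_emit diag diag.reverse min_len out)

def traverse_diag_right_from_bottom_alt (grid : List (List String)) (size : Int) (min_len : Int) : List String :=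
  (pv_outerB grid size min_len (PySem.List.pyRange 1 (size - min_len + 1) 1) []).getD []

-- ===== PRECONDITION & SPEC =====
-- Pre_ excludes (a) inputs on which A raises IndexError (a scanned diagonal cell lies outside the
-- grid), and (b) min_len ≤ 0 with a non-empty scan loop — a meaningless minimum word length no
-- caller would specify, where create_slices' negative slice bounds make A's strings an accidental corner.
def Pre_traverse_diag_right_from_bottom (grid : List (List String)) (size : Int) (min_len : Int) : Prop :=
  size - min_len ≤ 0 ∨
  (1 ≤ min_len ∧ size ≤ (grid.length : Int) ∧
    ∀ j ∈ List.range grid.length, 1 ≤ j → (j : Int) < size →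
      min (j : Int) (size - min_len) + size - 1 - (j : Int) < ((grid.getD j []).length : Int))
instance (grid : List (List String)) (size : Int) (min_len : Int) : Decidable (Pre_traverse_diag_right_from_bottom grid size min_len) := by unfold Pre_traverse_diag_right_from_bottom; infer_instance

def pvWitness_traverse_diag_right_from_bottom : List (List String) × Int × Int :=
  ([["a", "b"], ["c", "d"]], 2, 1)

def Spec_traverse_diag_right_from_bottom (grid : List (List String)) (size : Int) (min_len : Int) (out : List String) : Prop := out = traverse_diag_right_from_bottom_alt grid size min_len
instance (grid : List (List String)) (size : Int) (min_len : Int) (out : List String) : Decidable (Spec_traverse_diag_right_from_bottom grid size min_len out) := by unfold Spec_traverse_diag_right_from_bottom; infer_instance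

-- ===== CLAIM (what is proved, stated in full; the proofs are below) =====
def Claim_equal_traverse_diag_right_from_bottom : Prop := ∀ (grid : List (List String)) (size : Int) (min_len : Int), Dom_traverse_diag_right_from_bottom grid size min_len → Pre_traverse_diag_right_from_bottom grid size min_len → Spec_traverse_diag_right_from_bottom grid size min_len (traverse_diag_right_from_bottom grid size min_len)

-- ===== LEMMAS AND PROOFS =====

-- ''.join over a list of strings is flattening of the character lists
theorem pv_join_flatten (parts : List String) :
    (PySem.Str.join "" parts).toList = (parts.map String.toList).flatten := by
  have h : ∀ ls : List (List Char), PySem.Chars.join [] ls = ls.flatten := by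
    intro ls
    induction ls with
    | nil => simp [PySem.Chars.join_nil]
    | cons x ls ih =>
      cases ls with
      | nil => simp [PySem.Chars.join_singleton]
      | cons y ls => simp [PySem.Chars.join_cons_cons, ih]
  simp [pysem, h]

theorem pv_join_snoc (parts : List String) (x : String) :
    PySem.Str.join "" (parts ++ [x]) = PySem.Str.join "" parts ++ x := by
  apply String.toList_inj.mp
  rw [String.toList_append, pv_join_flatten, pv_join_flatten]
  simp

-- the lockstep inner fold of pv_emit, characterised on a pair of equal-length tails
theorem pv_pair_fold : ∀ (xs ys : List String), xs.length = ys.length →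
    ∀ (rs : List String) (pf pr : List String),
    ((xs.zip ys).foldl
        (fun (q : List String × String × String) xy =>
          (q.1 ++ [q.2.1 ++ xy.1, q.2.2 ++ xy.2], q.2.1 ++ xy.1, q.2.2 ++ xy.2))
        (rs ++ [PySem.Str.join "" pf, PySem.Str.join "" pr],
         PySem.Str.join "" pf, PySem.Str.join "" pr)).1
      = rs ++ (List.range (xs.length + 1)).flatMap
          (fun t => [PySem.Str.join "" (pf ++ xs.take t),
                     PySem.Str.join "" (pr ++ ys.take t)]) := by
  intro xs
  induction xs with
  | nil => intro ys h rs pf pr; simp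
  | cons x xs ih =>
    intro ys h rs pf pr
    cases ys with
    | nil => simp at h
    | cons y ys =>
      simp only [List.zip_cons_cons, List.foldl_cons]
      rw [show PySem.Str.join "" pf ++ x = PySem.Str.join "" (pf ++ [x]) from
            (pv_join_snoc pf x).symm,
          show PySem.Str.join "" pr ++ y = PySem.Str.join "" (pr ++ [y]) from
            (pv_join_snoc pr y).symm]
      rw [ih ys (by simpa using h) (rs ++ [PySem.Str.join "" pf, PySem.Str.join "" pr])
            (pf ++ [x]) (pr ++ [y])]
      conv_rhs => rw [List.length_cons, List.range_succ_eq_map, List.range_succ_eq_map]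
      rw [List.range_succ_eq_map]
      simp [List.flatMap_map, List.take_succ_cons, List.append_assoc]

-- the forward/reverse interleaved block emitted for one start position a
def pv_iblock (f r : List String) (ml a : Int) : List String :=
  (PySem.List.pyRange (a + ml) ((f.length : Int) + 1) 1).flatMap
    (fun j => [PySem.Str.join "" (PySem.List.slice f (some a) (some j)),
               PySem.Str.join "" (PySem.List.slice r (some a) (some j))])

theorem pv_emit_body (f r : List String) (ml a : Int) (hml : 1 ≤ ml)
    (hlen : r.length = f.length) (ha : 0 ≤ a) (hub : a < (f.length : Int) - ml + 1)
    (o : List String) :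
    (((PySem.List.slice f (some (a + ml)) none).zip
        (PySem.List.slice r (some (a + ml)) none)).foldl
      (fun (q : List String × String × String) xy =>
        (q.1 ++ [q.2.1 ++ xy.1, q.2.2 ++ xy.2], q.2.1 ++ xy.1, q.2.2 ++ xy.2))
      (o ++ [PySem.Str.join "" (PySem.List.slice f (some a) (some (a + ml))),
             PySem.Str.join "" (PySem.List.slice r (some a) (some (a + ml)))],
       PySem.Str.join "" (PySem.List.slice f (some a) (some (a + ml))),
       PySem.Str.join "" (PySem.List.slice r (some a) (some (a + ml))))).1
      = o ++ pv_iblock f r ml a := by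
  have hAM : (0:Int) ≤ a + ml := by omega
  have hle : a + ml ≤ (f.length : Int) := by omega
  have hxs : (PySem.List.slice f (some (a + ml)) none).length
      = (PySem.List.slice r (some (a + ml)) none).length := by
    rw [PySem.List.slice_from f hAM, PySem.List.slice_from r hAM]
    simp [hlen]
  rw [pv_pair_fold _ _ hxs o (PySem.List.slice f (some a) (some (a + ml)))
        (PySem.List.slice r (some a) (some (a + ml)))]
  congr 1
  have hstep : ∀ (l : List String) (t : Nat),
      PySem.List.slice l (some a) (some (a + ml)) ++ (l.drop (a + ml).toNat).take t
        = PySem.List.slice l (some a) (some (a + ml + (t : Int))) := by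
    intro l t
    rw [PySem.List.slice_toNat l ha hAM,
        PySem.List.slice_toNat l ha (by omega : (0:Int) ≤ a + ml + (t : Int))]
    have h1 : (a + ml).toNat = a.toNat + ml.toNat := by omega
    have h2 : (a + ml).toNat - a.toNat = ml.toNat := by omega
    have h3 : (a + ml + (t : Int)).toNat - a.toNat = ml.toNat + t := by omega
    rw [h2, h3, h1, ← List.drop_drop, List.take_add]
  unfold pv_iblock
  rw [PySem.List.pyRange_one, List.flatMap_map]
  rw [PySem.List.slice_from f hAM, PySem.List.slice_from r hAM]
  have hcount : (List.drop (a + ml).toNat f).length + 1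
      = (((f.length : Int) + 1) - (a + ml)).toNat := by
    simp only [List.length_drop]
    omega
  rw [hcount]
  apply List.flatMap_congr
  intro t _
  rw [hstep f t, hstep r t]

theorem pv_emit_eq (f r : List String) (ml : Int) (hml : 1 ≤ ml)
    (hlen : r.length = f.length) (out : List String) :
    pv_emit f r ml out
      = out ++ (PySem.List.pyRange 0 ((f.length : Int) - ml + 1) 1).flatMap
          (pv_iblock f r ml) := by
  unfold pv_emit
  rw [PySem.List.foldl_congr_mem _ _ (fun o a => o ++ pv_iblock f r ml a) _
        (by
          intro acc a hamem
          obtain ⟨ha0, hau⟩ := PySem.List.mem_pyRange_one.mp hamem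
          exact pv_emit_body f r ml a hml hlen ha0 hau acc)]
  exact PySem.List.foldl_append_eq_flatMap _ _ _

-- A's create_slices is exactly the concatenation of the interleaved blocks
theorem pv_create_slices_eq (arr : List String) (ml : Int) :
    create_slices arr ml
      = (PySem.List.pyRange 0 ((arr.length : Int) - ml + 1) 1).flatMap
          (pv_iblock arr arr.reverse ml) := by
  have hinner : ∀ (i : Int) (rl : List String),
      (PySem.List.pyRange (i + ml) ((arr.length : Int) + 1) 1).foldl
        (fun rl j =>
          (rl ++ [PySem.Str.join "" (PySem.List.slice arr (some i) (some j))])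
             ++ [PySem.Str.join "" (PySem.List.slice arr.reverse (some i) (some j))]) rl
      = rl ++ pv_iblock arr arr.reverse ml i := by
    intro i rl
    have hb : (fun (rl : List String) (j : Int) =>
          (rl ++ [PySem.Str.join "" (PySem.List.slice arr (some i) (some j))])
             ++ [PySem.Str.join "" (PySem.List.slice arr.reverse (some i) (some j))])
        = fun (rl : List String) (j : Int) =>
            rl ++ [PySem.Str.join "" (PySem.List.slice arr (some i) (some j)),
                   PySem.Str.join "" (PySem.List.slice arr.reverse (some i) (some j))] := by
      funext rl j
      simp
    rw [hb]
    exact PySem.List.foldl_append_eq_flatMap _ _ _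
  unfold create_slices
  rw [PySem.List.foldl_congr_mem _ _ (fun rl i => rl ++ pv_iblock arr arr.reverse ml i) _
        (by intro acc x _; exact hinner x acc)]
  rw [PySem.List.foldl_append_eq_flatMap]
  simp

-- the canonical diagonal cell and the two diagonal computations
def pvCellD (grid : List (List String)) (size i : Int) (t : Nat) : String :=
  PySem.List.pyGetD (PySem.List.pyGetD grid (size - 1 - (t:Int)) []) (i + (t:Int)) ""

theorem pv_diagA_eq (grid : List (List String)) (size i : Int) (m : Nat)
    (hi : 0 ≤ i) (hsz : size = i + m)
    (hok : ∀ t : Nat, t < m →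
      size - 1 - (t:Int) < (grid.length : Int) ∧
      i + (t:Int) < ((PySem.List.pyGetD grid (size - 1 - (t:Int)) []).length : Int)) :
    ∀ (N t0 : Nat) (acc : List String), m - t0 = N →
      pv_diag_loop grid (size - 1 - (t0:Int)) (i - 1) acc (i + (t0:Int))
        = some (acc ++ (List.range (m - t0)).map (fun k => pvCellD grid size i (t0 + k))) := by
  intro N
  induction N with
  | zero =>
    intro t0 acc hN
    rw [pv_diag_loop, dif_pos (by omega : size - 1 - (t0:Int) ≤ i - 1)]
    rw [hN]
    simp
  | succ N ih =>
    intro t0 acc hN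
    have ht0 : t0 < m := by omega
    obtain ⟨hjlt, hklt⟩ := hok t0 ht0
    have hj0 : (0:Int) ≤ size - 1 - (t0:Int) := by omega
    have hk0 : (0:Int) ≤ i + (t0:Int) := by omega
    rw [pv_diag_loop, dif_neg (by omega : ¬ size - 1 - (t0:Int) ≤ i - 1)]
    have hg : PySem.List.pyGet? grid (size - 1 - (t0:Int))
        = some (PySem.List.pyGetD grid (size - 1 - (t0:Int)) []) := by
      rw [PySem.List.pyGet?_eq_some_getElem grid hj0 hjlt,
          PySem.List.pyGetD_eq_getElem grid [] hj0 hjlt]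
    rw [hg]
    dsimp only
    have hc : PySem.List.pyGet? (PySem.List.pyGetD grid (size - 1 - (t0:Int)) []) (i + (t0:Int))
        = some (pvCellD grid size i t0) := by
      rw [PySem.List.pyGet?_eq_some_getElem _ hk0 hklt]
      unfold pvCellD
      rw [PySem.List.pyGetD_eq_getElem _ "" hk0 hklt]
    rw [hc]
    dsimp only
    rw [show size - 1 - (t0:Int) - 1 = size - 1 - ((t0 + 1 : Nat) : Int) by push_cast; ring,
        show i + (t0:Int) + 1 = i + ((t0 + 1 : Nat) : Int) by push_cast; ring]
    rw [ih (t0 + 1) (acc ++ [pvCellD grid size i t0]) (by omega)]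
    congr 1
    rw [show m - t0 = (m - (t0 + 1)) + 1 by omega, List.range_succ_eq_map]
    simp [List.map_map, Function.comp_def]
    intro a _
    congr 1
    omega

theorem pv_rowsB_eq (grid : List (List String)) (size i : Int) (m : Nat)
    (hi : 0 ≤ i) (hsz : size = i + m) (hglen : size ≤ (grid.length : Int)) :
    (PySem.List.slice grid (some i) (some size)).reverse
      = (List.range m).map (fun (t : Nat) => PySem.List.pyGetD grid (size - 1 - (t:Int)) []) := by
  rw [PySem.List.slice_toNat grid hi (by omega : (0:Int) ≤ size)]
  apply List.ext_getElem
  · simp; omega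
  · intro t h1 h2
    have htm : t < m := by simpa using h2
    have hml : (List.take (size.toNat - i.toNat) (List.drop i.toNat grid)).length = m := by
      simp; omega
    have htI : (t : Int) < (m : Int) := by exact_mod_cast htm
    rw [List.getElem_reverse, List.getElem_map, List.getElem_range]
    rw [PySem.List.pyGetD_eq_getElem grid [] (by omega) (by omega)]
    rw [List.getElem_take, List.getElem_drop]
    simp only [hml]
    congr 1
    omega

theorem pv_cells_eq (i : Int) : ∀ (L : List (List String)) (s : Int),
    (∀ p ∈ PySem.List.enumerate L s, 0 ≤ i + p.1 ∧ i + p.1 < (p.2.length : Int)) →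
    pv_diag_cells i (PySem.List.enumerate L s)
      = some ((PySem.List.enumerate L s).map
          (fun p => PySem.List.pyGetD p.2 (i + p.1) "")) := by
  intro L
  induction L with
  | nil => intro s _; simp [PySem.List.enumerate_nil, pv_diag_cells]
  | cons row L ih =>
    intro s hok
    rw [PySem.List.enumerate_cons]
    obtain ⟨h0, h1⟩ := hok (s, row) (by rw [PySem.List.enumerate_cons]; exact List.mem_cons_self)
    rw [pv_diag_cells]
    rw [PySem.List.pyGet?_eq_some_getElem _ h0 h1]
    rw [ih (s + 1) (by
      intro p hp
      exact hok p (by rw [PySem.List.enumerate_cons]; exact List.mem_cons_of_mem _ hp))]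
    simp [PySem.List.pyGetD_eq_getElem _ "" h0 h1]

theorem pv_enum_map_eq (grid : List (List String)) (size i : Int) (m : Nat) :
    (PySem.List.enumerate ((List.range m).map
        (fun (t : Nat) => PySem.List.pyGetD grid (size - 1 - (t:Int)) [])) 0).map
      (fun p => PySem.List.pyGetD p.2 (i + p.1) "")
      = (List.range m).map (fun k => pvCellD grid size i k) := by
  apply List.ext_getElem
  · simp [PySem.List.length_enumerate]
  · intro k h1 h2
    simp only [List.getElem_map, PySem.List.getElem_enumerate, List.getElem_range]
    unfold pvCellD
    norm_num

-- the two outer loops agree step by step under Pre_'s bounds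
theorem pv_outer_eq (grid : List (List String)) (size ml : Int) (hml : 1 ≤ ml)
    (hglen : size ≤ (grid.length : Int))
    (hcell : ∀ j ∈ List.range grid.length, 1 ≤ j → (j : Int) < size →
        min (j : Int) (size - ml) + size - 1 - (j : Int) < ((grid.getD j []).length : Int)) :
    ∀ (N : Nat) (i : Int) (ret : List String), 1 ≤ i → (size - ml + 1 - i).toNat = N →
      pv_outerA grid size ml i (size - ml + 1) ret
        = pv_outerB grid size ml (PySem.List.pyRange i (size - ml + 1) 1) ret := by
  intro N
  induction N with
  | zero =>
    intro i ret hi hN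
    rw [pv_outerA, dif_pos (by omega : size - ml + 1 ≤ i)]
    rw [PySem.List.pyRange_one, show (size - ml + 1 - i).toNat = 0 from hN]
    rfl
  | succ N ih =>
    intro i ret hi hN
    have hilt : i < size - ml + 1 := by omega
    have hok : ∀ t : Nat, t < (size - i).toNat →
        size - 1 - (t:Int) < (grid.length : Int) ∧
        i + (t:Int) < ((PySem.List.pyGetD grid (size - 1 - (t:Int)) []).length : Int) := by
      intro t ht
      have htI : (t:Int) < size - i := by omega
      have hj0 : (0:Int) ≤ size - 1 - (t:Int) := by omega
      have hjI : (((size - 1 - (t:Int)).toNat : Nat) : Int) = size - 1 - (t:Int) := by omega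
      have hjlt : (size - 1 - (t:Int)).toNat < grid.length := by omega
      have hrow : PySem.List.pyGetD grid (size - 1 - (t:Int)) []
          = grid.getD (size - 1 - (t:Int)).toNat [] := by
        rw [← hjI, PySem.List.pyGetD_natCast]
        simp
      have hc := hcell (size - 1 - (t:Int)).toNat (List.mem_range.mpr hjlt)
        (by omega) (by omega)
      refine ⟨by omega, ?_⟩
      rw [hrow]
      omega
    have hsz : size = i + ((size - i).toNat : Int) := by omega
    have hA : pv_diag_loop grid (size - 1) (i - 1) [] i
        = some ((List.range (size - i).toNat).map (fun k => pvCellD grid size i k)) := by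
      have := pv_diagA_eq grid size i (size - i).toNat (by omega) hsz hok
        (size - i).toNat 0 [] (by omega)
      simpa using this
    have hB : pv_diagB grid size i
        = some ((List.range (size - i).toNat).map (fun k => pvCellD grid size i k)) := by
      unfold pv_diagB
      rw [pv_rowsB_eq grid size i (size - i).toNat (by omega) hsz hglen]
      rw [pv_cells_eq i _ 0 (by
        intro p hp
        obtain ⟨k, hk, hp'⟩ := (PySem.List.mem_enumerate_iff _ _ _).mp hp
        subst hp'
        simp only [List.getElem_map, List.getElem_range]
        have hkm : k < (size - i).toNat := by simpa using hk
        obtain ⟨h1, h2⟩ := hok k hkm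
        constructor
        · simp; omega
        · simpa using h2)]
      rw [pv_enum_map_eq grid size i (size - i).toNat]
    rw [pv_outerA, dif_neg (by omega : ¬ size - ml + 1 ≤ i)]
    rw [PySem.List.pyRange_one_cons (by omega : i < size - ml + 1)]
    rw [pv_outerB, hA, hB]
    dsimp only
    rw [PySem.List.foldl_append_singleton]
    rw [pv_emit_eq _ _ ml hml (by simp) ret]
    rw [← pv_create_slices_eq]
    exact ih (i + 1) _ (by omega) (by omega)

-- ===== VERDICT (by name: the statement is the Claim_ definition above) =====
theorem traverse_diag_right_from_bottom_spec : Claim_equal_traverse_diag_right_from_bottom := by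
  intro grid size ml hdom hpre
  unfold Spec_traverse_diag_right_from_bottom
  unfold traverse_diag_right_from_bottom traverse_diag_right_from_bottom_alt
  rcases hpre with h | ⟨hml, hglen, hcell⟩
  · rw [pv_outerA, dif_pos (by omega : size - ml + 1 ≤ 1)]
    rw [PySem.List.pyRange_one, show (size - ml + 1 - 1).toNat = 0 by omega]
    rfl
  · rw [pv_outer_eq grid size ml hml hglen hcell (size - ml + 1 - 1).toNat 1 [] (by omega) rfl]
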